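-- pv_equiv track=rewrite | github.com/mattiaZonelli/sudoku-relab-backtracking | sudoku_backtracking/sudoku.py | getNext2Fill
-- ===== SOURCE A (Python) =====
-- def domain_length(domain):
--     if domain == '':
--         return 10
--     else:
--         return len(domain)
--
-- def getNext2Fill(domains):
--     flat_domains = [item for sublist in domains for item in sublist]
--     dom_len_list = list(map(domain_length, flat_domains))
--     min_len = min(dom_len_list)
--     if min_len == 10:
--         return None, None
--     else:
--         index = dom_len_list.index(min_len)
--         return index // 9, index % 9
-- ===== SOURCE B (Python) =====
-- def getNext2Fill(domains):
--     pairs = sorted(enumerate(d for row in domains for d in row),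
--                    key=lambda p: 10 if p[1] == '' else len(p[1]))
--     if not pairs:
--         return None, None
--     index, dom = pairs[0]
--     if (10 if dom == '' else len(dom)) == 10:
--         return None, None
--     return divmod(index, 9)
-- ===== Notes on version B (the rewrite author's own statement) =====
-- stated objective: alternative
-- what changed: Replaces the flatten/map/min/index chain by enumerating the flat cells once and stably sorting the (index, domain) pairs by effective length, so the first element of the sorted list is directly the wanted cell.
import Mathlib
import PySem

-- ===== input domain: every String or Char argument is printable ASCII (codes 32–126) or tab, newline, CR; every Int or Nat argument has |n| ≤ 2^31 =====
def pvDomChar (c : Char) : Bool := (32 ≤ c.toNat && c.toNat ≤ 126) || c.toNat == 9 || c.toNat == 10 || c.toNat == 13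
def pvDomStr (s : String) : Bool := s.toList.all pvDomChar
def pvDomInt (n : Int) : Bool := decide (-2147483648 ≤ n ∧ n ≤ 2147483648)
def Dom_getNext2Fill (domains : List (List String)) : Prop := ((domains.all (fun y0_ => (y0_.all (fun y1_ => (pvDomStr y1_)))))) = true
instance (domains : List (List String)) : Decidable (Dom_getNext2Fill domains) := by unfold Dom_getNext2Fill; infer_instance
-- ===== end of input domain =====

-- B replaces A's flatten/map/min/index chain by sorting the enumerated flat cell list by effective domain length (Python's stable sort) and taking the first element; same return value wherever A returns (Pre_ excludes the empty-flatten grid, on which A's min([]) raises ValueError while B returns (None, None)).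


-- ===== PORT A =====
def domainLength (domain : String) : Int :=
  if domain = "" then 10 else (PySem.Str.len domain : Int)

def getNext2Fill (domains : List (List String)) : Option Int × Option Int :=
  let flatDomains := domains.flatMap (fun sublist => sublist)
  let domLenList := flatDomains.map domainLength
  match PySem.List.min? domLenList (fun x => x) with
  | none => (none, none)  -- Python: min([]) raises ValueError; excluded by Pre_
  | some minLen =>
    if minLen = 10 then (none, none)
    else
      match PySem.List.index? domLenList minLen with
      | none => (none, none)  -- unreachable: minLen is a member of domLenList
      | some index => (some (PySem.Int.floordiv (index : Int) 9), some (PySem.Int.mod (index : Int) 9))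

-- ===== PORT B =====
def getNext2Fill_alt (domains : List (List String)) : Option Int × Option Int :=
  let pairs := PySem.List.sorted
      (PySem.List.enumerate (domains.flatMap (fun sublist => sublist)) 0)
      (fun p => if p.2 = "" then (10 : Int) else (PySem.Str.len p.2 : Int))
  match pairs with
  | [] => (none, none)
  | (index, dom) :: _ =>
    if (if dom = "" then (10 : Int) else (PySem.Str.len dom : Int)) = 10 then (none, none)
    else (some (PySem.Int.floordiv index 9), some (PySem.Int.mod index 9))

-- ===== PRECONDITION & SPEC =====
-- Pre_ excludes exactly the inputs whose flattening is empty, on which Python's min([]) raises ValueError.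
def Pre_getNext2Fill (domains : List (List String)) : Prop :=
  domains.flatMap (fun sublist => sublist) ≠ []
instance (domains : List (List String)) : Decidable (Pre_getNext2Fill domains) := by unfold Pre_getNext2Fill; infer_instance

def pvWitness_getNext2Fill : List (List String) := [["ab", ""], ["c"]]

def Spec_getNext2Fill (domains : List (List String)) (out : Option Int × Option Int) : Prop := out = getNext2Fill_alt domains
instance (domains : List (List String)) (out : Option Int × Option Int) : Decidable (Spec_getNext2Fill domains out) := by unfold Spec_getNext2Fill; infer_instance

-- ===== CLAIM (what is proved, stated in full; the proofs are below) =====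
def Claim_equal_getNext2Fill : Prop := ∀ (domains : List (List String)), Dom_getNext2Fill domains → Pre_getNext2Fill domains → Spec_getNext2Fill domains (getNext2Fill domains)

-- ===== LEMMAS AND PROOFS =====

-- head-selection step: how the head of an insertion sort evolves as one element is inserted
def pickG (o : Option (Int × String)) (x : Int × String) : Option (Int × String) :=
  match o with
  | none => some x
  | some y => if domainLength x.2 < domainLength y.2 then some x else some y

theorem head?_foldl_insertBy (xs : List (Int × String)) : ∀ (acc : List (Int × String)),
    (List.foldl (fun a x => PySem.List.insertBy
        (fun a b => decide (domainLength a.2 < domainLength b.2)) x a) acc xs).head?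
    = List.foldl pickG acc.head? xs := by
  induction xs with
  | nil => intro acc; rfl
  | cons x xs ih =>
    intro acc
    rw [List.foldl_cons, List.foldl_cons, ih]
    congr 1
    cases acc with
    | nil => rfl
    | cons y ys =>
      simp only [PySem.List.insertBy, pickG, List.head?_cons]
      split_ifs with h h' h'
      · rfl
      · exact absurd h (by simpa using h')
      · exact absurd (by simpa using h') h
      · rfl

-- running-head invariant: folding pickG over the enumerated tail computes the running
-- minimum of the length list and the flat index of its first strictly-smaller occurrence.
theorem pickG_enumerate (xs : List String) : ∀ (i : Int) (p : Int × String),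
    ∃ q, List.foldl pickG (some p) (PySem.List.enumerate xs i) = some q ∧
      domainLength q.2 = (xs.map domainLength).foldl min (domainLength p.2) ∧
      (if (xs.map domainLength).foldl min (domainLength p.2) < domainLength p.2
       then ∃ k : Nat, PySem.List.index? (xs.map domainLength)
                ((xs.map domainLength).foldl min (domainLength p.2)) = some k ∧ q.1 = i + (k : Int)
       else q = p) := by
  induction xs with
  | nil =>
    intro i p
    exact ⟨p, by simp [PySem.List.enumerate_nil], by simp, by simp⟩
  | cons d xs ih =>
    intro i p
    rw [PySem.List.enumerate_cons, List.foldl_cons]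
    by_cases hl : domainLength d < domainLength p.2
    · have hstep : pickG (some p) (i, d) = some (i, d) := by simp [pickG, hl]
      rw [hstep]
      obtain ⟨q, hq, h1, h2⟩ := ih (i + 1) (i, d)
      have hm : ((d :: xs).map domainLength).foldl min (domainLength p.2)
          = (xs.map domainLength).foldl min (domainLength d) := by
        simp [List.foldl_cons, min_eq_right (le_of_lt hl)]
      have hMd : (xs.map domainLength).foldl min (domainLength d) ≤ domainLength d :=
        PySem.List.min?_isMin (PySem.List.min?_id_cons _ _) _ (by simp)
      refine ⟨q, hq, by rw [hm]; exact h1, ?_⟩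
      rw [hm, if_pos (lt_of_le_of_lt hMd hl)]
      by_cases hlt : (xs.map domainLength).foldl min (domainLength d) < domainLength d
      · rw [if_pos hlt] at h2
        obtain ⟨k, hk, hr⟩ := h2
        refine ⟨k + 1, ?_, ?_⟩
        · rw [List.map_cons, PySem.List.index?_cons_of_ne _ (by omega), hk]; rfl
        · rw [hr]; push_cast; ring
      · have heq : (xs.map domainLength).foldl min (domainLength d) = domainLength d :=
          le_antisymm hMd (not_lt.mp hlt)
        rw [if_neg hlt] at h2
        refine ⟨0, ?_, ?_⟩
        · rw [List.map_cons, heq, PySem.List.index?_cons_self]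
        · rw [h2]; simp
    · have hstep : pickG (some p) (i, d) = some p := by simp [pickG, hl]
      rw [hstep]
      obtain ⟨q, hq, h1, h2⟩ := ih (i + 1) p
      have hm : ((d :: xs).map domainLength).foldl min (domainLength p.2)
          = (xs.map domainLength).foldl min (domainLength p.2) := by
        simp [List.foldl_cons, min_eq_left (not_lt.mp hl)]
      refine ⟨q, hq, by rw [hm]; exact h1, ?_⟩
      rw [hm]
      by_cases hlt : (xs.map domainLength).foldl min (domainLength p.2) < domainLength p.2
      · rw [if_pos hlt]; rw [if_pos hlt] at h2
        obtain ⟨k, hk, hr⟩ := h2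
        have hne : domainLength d ≠ (xs.map domainLength).foldl min (domainLength p.2) := by
          have := not_lt.mp hl; omega
        refine ⟨k + 1, ?_, ?_⟩
        · rw [List.map_cons, PySem.List.index?_cons_of_ne _ hne, hk]; rfl
        · rw [hr]; push_cast; ring
      · rw [if_neg hlt]; rw [if_neg hlt] at h2; exact h2

theorem getNext2Fill_spec : Claim_equal_getNext2Fill := by
  intro domains _ hpre
  unfold Pre_getNext2Fill at hpre
  unfold Spec_getNext2Fill getNext2Fill getNext2Fill_alt
  have hkey : (fun p : Int × String => if p.2 = "" then (10 : Int) else (PySem.Str.len p.2 : Int))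
      = (fun p : Int × String => domainLength p.2) := rfl
  rw [hkey]
  cases hflat : domains.flatMap (fun sublist => sublist) with
  | nil => exact absurd hflat hpre
  | cons d rest =>
    dsimp only
    -- B's head: sorted = insertion fold, whose head is the pickG scan
    rw [PySem.List.sorted_eq_foldl_insertBy, PySem.List.enumerate_cons]
    obtain ⟨q, hq, h1, h2⟩ := pickG_enumerate rest (0 + 1) ((0 : Int), d)
    have hhead : (List.foldl (fun acc x => PySem.List.insertBy
        (fun a b => decide (domainLength a.2 < domainLength b.2)) x acc) ([] : List (Int × String))
        (((0 : Int), d) :: PySem.List.enumerate rest (0 + 1))).head? = some q := by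
      rw [head?_foldl_insertBy]
      simpa [pickG] using hq
    -- A's min
    set M := (rest.map domainLength).foldl min (domainLength d) with hM
    have hMd : M ≤ domainLength d :=
      PySem.List.min?_isMin (PySem.List.min?_id_cons _ _) _ (by simp)
    rw [List.map_cons, PySem.List.min?_id_cons, ← hM]
    cases hs : List.foldl (fun acc x => PySem.List.insertBy
        (fun a b => decide (domainLength a.2 < domainLength b.2)) x acc) ([] : List (Int × String))
        (((0 : Int), d) :: PySem.List.enumerate rest (0 + 1)) with
    | nil => rw [hs] at hhead; exact absurd hhead (by simp)
    | cons y t =>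
      rw [hs] at hhead
      have hy : y = q := by simpa using hhead
      subst hy
      have hq2 : (if y.2 = "" then (10 : Int) else (PySem.Str.len y.2 : Int)) = M := h1
      dsimp only
      by_cases hm10 : M = 10
      · rw [if_pos hm10, if_pos (hq2.trans hm10)]
      · rw [if_neg hm10, if_neg (by rw [hq2]; exact hm10)]
        by_cases hlt : M < domainLength d
        · rw [if_pos hlt] at h2
          obtain ⟨k, hk, hr⟩ := h2
          rw [PySem.List.index?_cons_of_ne _ (by omega : domainLength d ≠ M), hk]
          have : y.1 = ((k + 1 : Nat) : Int) := by rw [hr]; push_cast; ring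
          rw [this]; rfl
        · have heq : M = domainLength d := le_antisymm hMd (not_lt.mp hlt)
          rw [if_neg hlt] at h2
          rw [heq, PySem.List.index?_cons_self]
          have : y.1 = ((0 : Nat) : Int) := by rw [h2]; simp
          rw [this]
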